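-- pv_equiv track=rewrite | github.com/kan2926/PythonPrep | ik/ik_extract_info.py | solve
-- ===== SOURCE A (Python) =====
-- from collections import defaultdict
--
-- def solve(arr):
--     d = defaultdict(list)
--
--     for i in range(len(arr)):
--         key = arr[i].split(' ')[0]
--         value = arr[i].split(' ')[1]
--         d[key].append(value)
--     s = []
--     for k,v in d.items():
--         s.append(k+':'+str(len(v))+',' +max(v))
--     return s
-- ===== SOURCE B (Python) =====
-- def solve(arr):
--     agg = {}
--     for s in arr:
--         parts = s.split(' ')
--         key = parts[0]
--         value = parts[1]
--         if key in agg: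
--             c, m = agg[key]
--             agg[key] = (c + 1, value if m < value else m)
--         else:
--             agg[key] = (1, value)
--     return [k + ':' + str(c) + ',' + m for k, (c, m) in agg.items()]
-- ===== Notes on version B (the rewrite author's own statement) =====
-- stated objective: simpler
-- what changed: B maintains a dict of per-key (count, running lexicographic max) aggregates updated in one pass, instead of A's dict of per-key value lists followed by a second pass computing len(v) and a max(v) scan over each list.
import Mathlib
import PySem

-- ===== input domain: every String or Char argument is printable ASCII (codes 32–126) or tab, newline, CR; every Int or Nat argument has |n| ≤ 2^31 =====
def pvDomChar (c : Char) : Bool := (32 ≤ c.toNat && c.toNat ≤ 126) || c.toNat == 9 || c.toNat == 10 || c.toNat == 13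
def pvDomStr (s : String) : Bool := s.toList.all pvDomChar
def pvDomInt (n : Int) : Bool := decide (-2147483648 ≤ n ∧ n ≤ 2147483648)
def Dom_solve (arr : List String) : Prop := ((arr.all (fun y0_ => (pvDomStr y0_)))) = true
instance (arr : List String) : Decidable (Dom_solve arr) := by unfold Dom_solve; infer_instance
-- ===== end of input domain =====

-- B replaces A's dict of per-key value LISTS (with a second pass doing len(v) and a max(v) scan)
-- by a dict of per-key (count, running max) aggregates maintained in one pass: simpler, no lists kept.

-- key / value extraction both source programs perform: s.split(' ')[0] and s.split(' ')[1]
-- (index ported with a default; Pre_solve guarantees index 1 exists, i.e. Python does not raise)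
def pvKey (s : String) : String :=
  PySem.List.pyGetD ((PySem.Str.split? s " ").getD []) 0 ""
def pvVal (s : String) : String :=
  PySem.List.pyGetD ((PySem.Str.split? s " ").getD []) 1 ""

-- ===== PORT A =====
-- loop body of A: d[key].append(value) on a defaultdict(list)
def pvStepA (d : PySem.Dict String (List String)) (s : String) : PySem.Dict String (List String) :=
  d.insert (pvKey s) (d.getD (pvKey s) [] ++ [pvVal s])

def solve (arr : List String) : List String :=
  let d := (PySem.List.pyRange 0 (PySem.List.len arr) 1).foldl
      (fun d i => pvStepA d (PySem.List.pyGetD arr i "")) PySem.Dict.empty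
  d.items.foldl
    (fun s kv =>
      s ++ [kv.1 ++ ":" ++ PySem.Int.toStr (kv.2.length : Int) ++ "," ++
        (PySem.List.max? kv.2 (fun y => y)).getD ""])
    []

-- ===== PORT B =====
-- loop body of B: first sight stores (1, value); else count+1 and running lexicographic max
def pvStepB (d : PySem.Dict String (Int × String)) (s : String) : PySem.Dict String (Int × String) :=
  if d.contains (pvKey s) then
    let cm := d.getD (pvKey s) (0, "")
    d.insert (pvKey s) (cm.1 + 1, if cm.2 < pvVal s then pvVal s else cm.2)
  else
    d.insert (pvKey s) (1, pvVal s)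

def solve_alt (arr : List String) : List String :=
  (arr.foldl pvStepB PySem.Dict.empty).items.map
    (fun kv => kv.1 ++ ":" ++ PySem.Int.toStr kv.2.1 ++ "," ++ kv.2.2)

-- ===== PRECONDITION & SPEC =====
-- Pre_solve excludes exactly the inputs on which Python A raises IndexError: an element with no
-- space character has split(' ') of length 1, so [1] raises (Python B raises there too).
def Pre_solve (arr : List String) : Prop := ∀ s ∈ arr, ' ' ∈ s.toList
instance (arr : List String) : Decidable (Pre_solve arr) := by unfold Pre_solve; infer_instance

def pvWitness_solve : List String := ["a 1", "b 2", "a 3"]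

def Spec_solve (arr : List String) (out : List String) : Prop := out = solve_alt arr
instance (arr : List String) (out : List String) : Decidable (Spec_solve arr out) := by
  unfold Spec_solve; infer_instance

-- ===== CLAIM (what is proved, stated in full; the proofs are below) =====
def Claim_equal_solve : Prop := ∀ (arr : List String), Dom_solve arr → Pre_solve arr → Spec_solve arr (solve arr)

-- ===== LEMMAS AND PROOFS =====

-- the aggregate B maintains, computed from A's value list
def pvG (v : List String) : Int × String :=
  ((v.length : Int), match v with | [] => "" | x :: t => t.foldl max x)

-- the per-entry rendering abstractions of B's value-mapped dict
def pvGE (kv : String × List String) : String × (Int × String) := (kv.1, pvG kv.2)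

theorem pv_if_max (m v : String) : (if m < v then v else m) = max m v := by
  rcases lt_or_ge m v with h | h
  · rw [if_pos h, max_eq_right h.le]
  · rw [if_neg (not_lt.mpr h), max_eq_left h]

theorem pv_get?_map (l : List (String × List String)) (k : String) :
    (PySem.Dict.mk (l.map pvGE)).get? k = ((PySem.Dict.mk l).get? k).map pvG := by
  induction l with
  | nil => simp [PySem.Dict.get?]
  | cons p t ih =>
      obtain ⟨pk, pv⟩ := p
      simp only [List.map_cons, pvGE, PySem.Dict.get?_mk_cons]
      split_ifs with h
      · rfl
      · exact ih

theorem pv_step_comm (s : String) (dA : PySem.Dict String (List String))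
    (hne : ∀ kv ∈ dA.items, kv.2 ≠ []) :
    pvStepB (PySem.Dict.mk (dA.items.map pvGE)) s
      = PySem.Dict.mk ((pvStepA dA s).items.map pvGE) := by
  have hget : (PySem.Dict.mk (dA.items.map pvGE)).get? (pvKey s)
      = (dA.get? (pvKey s)).map pvG := pv_get?_map dA.items (pvKey s)
  unfold pvStepA pvStepB
  cases h : dA.get? (pvKey s) with
  | none =>
      have hcontA : dA.contains (pvKey s) = false := by
        rw [PySem.Dict.contains_eq_isSome_get?, h]; rfl
      have hcontB : (PySem.Dict.mk (dA.items.map pvGE)).contains (pvKey s) = false := by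
        rw [PySem.Dict.contains_eq_isSome_get?, hget, h]; rfl
      have hgd : dA.getD (pvKey s) [] = [] := PySem.Dict.getD_of_get?_eq_none _ _ h
      rw [hcontB, if_neg (by simp)]
      apply PySem.Dict.ext
      rw [PySem.Dict.items_insert, PySem.Dict.items_insert, hcontA, hcontB,
          if_neg (by simp), if_neg (by simp)]
      simp [hgd, pvGE, pvG]
  | some v =>
      have hvne : v ≠ [] := hne _ (PySem.Dict.mem_items_of_get?_eq_some _ h)
      obtain ⟨x, t, rfl⟩ : ∃ x t, v = x :: t := by
        cases v with
        | nil => exact absurd rfl hvne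
        | cons x t => exact ⟨x, t, rfl⟩
      have hcontA : dA.contains (pvKey s) = true := by
        rw [PySem.Dict.contains_eq_isSome_get?, h]; rfl
      have hcontB : (PySem.Dict.mk (dA.items.map pvGE)).contains (pvKey s) = true := by
        rw [PySem.Dict.contains_eq_isSome_get?, hget, h]; rfl
      have hgdB : (PySem.Dict.mk (dA.items.map pvGE)).getD (pvKey s) (0, "")
          = pvG (x :: t) := by
        rw [PySem.Dict.getD_eq_get?_getD, hget, h]; rfl
      have hgdA : dA.getD (pvKey s) [] = x :: t := PySem.Dict.getD_of_get?_eq_some _ _ h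
      rw [hcontB, if_pos rfl]
      apply PySem.Dict.ext
      rw [PySem.Dict.items_insert, PySem.Dict.items_insert, hcontA, hcontB,
          if_pos rfl, if_pos rfl]
      simp only [hgdB, hgdA, List.map_map]
      refine List.map_congr_left ?_
      intro p _
      simp only [Function.comp, pvGE]
      by_cases hp : p.1 == pvKey s
      · simp only [hp, if_true]
        refine Prod.ext rfl (Prod.ext ?_ ?_)
        · simp [pvG]
        · rw [pv_if_max]
          show max (List.foldl max x t) (pvVal s) = List.foldl max x (t ++ [pvVal s])
          rw [List.foldl_append]
          rfl
      · simp [hp]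

theorem pv_loop (l : List String) :
    ∀ (dA : PySem.Dict String (List String)), (∀ kv ∈ dA.items, kv.2 ≠ []) →
      l.foldl pvStepB (PySem.Dict.mk (dA.items.map pvGE))
          = PySem.Dict.mk ((l.foldl pvStepA dA).items.map pvGE)
        ∧ (∀ kv ∈ (l.foldl pvStepA dA).items, kv.2 ≠ []) := by
  induction l with
  | nil => intro dA hne; exact ⟨rfl, hne⟩
  | cons s t ih =>
      intro dA hne
      have hne' : ∀ kv ∈ (pvStepA dA s).items, kv.2 ≠ [] := by
        intro kv hkv
        unfold pvStepA at hkv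
        rcases (PySem.Dict.mem_items_insert _ _ _ _).mp hkv with h1 | h2
        · subst h1; simp
        · exact hne _ h2.1
      simp only [List.foldl_cons]
      rw [pv_step_comm s dA hne]
      exact ih (pvStepA dA s) hne'

-- ===== VERDICT (by name: the statement is the Claim_ definition above) =====
theorem solve_spec : Claim_equal_solve := by
  intro arr _ _
  unfold Spec_solve solve solve_alt
  rw [PySem.List.foldl_pyRange_zero_pyGetD arr "" pvStepA PySem.Dict.empty]
  have hstart : (PySem.Dict.empty : PySem.Dict String (Int × String))
      = PySem.Dict.mk (((PySem.Dict.empty : PySem.Dict String (List String)).items).map pvGE) := rfl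
  obtain ⟨hd, hne⟩ := pv_loop arr PySem.Dict.empty (by intro kv hkv; simp [PySem.Dict.empty] at hkv)
  rw [hstart, hd]
  rw [PySem.List.foldl_append_singleton_eq_map]
  simp only [List.nil_append, List.map_map]
  refine (List.map_congr_left ?_).symm
  intro kv hkv
  obtain ⟨x, t, hxt⟩ : ∃ x t, kv.2 = x :: t := by
    cases hv : kv.2 with
    | nil => exact absurd hv (hne _ hkv)
    | cons x t => exact ⟨x, t, rfl⟩
  simp [Function.comp, pvGE, pvG, hxt, PySem.List.max?_id_cons]
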